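-- pv_equiv track=rewrite | github.com/Rupanshu-Kapoor/PythonChallenges | Practice/Maximum Pairwise Product.py | maxProductSearching2
-- ===== SOURCE A (Python) =====
-- def maxProductSearching2(nums:list[int]) -> int:
--     if len(nums) < 1:
--         return -1
--     if len(nums) == 2:
--         return (nums[0]-1) * (nums[1]-1)
--     else:
--         max1 = max2 = 0
--         for num in nums:
--             if num > max1:
--                 max2 = max1
--                 max1 = num
--             elif num > max2:
--                 max2 = num
--         return (max1-1)*(max2-1)
-- ===== SOURCE B (Python) =====
-- def maxProductSearching2(nums: list[int]) -> int:
--     if len(nums) < 1: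
--         return -1
--     if len(nums) == 2:
--         return (nums[0] - 1) * (nums[1] - 1)
--     s = sorted(nums + [0, 0], reverse=True)
--     return (s[0] - 1) * (s[1] - 1)
-- ===== Notes on version B (the rewrite author's own statement) =====
-- stated objective: simpler
-- what changed: Replaces the hand-rolled two-maxima tracking loop by sorting the input padded with two extra zeros in descending order and taking the first two elements (the padding zeros reproduce A's zero baseline).
import Mathlib
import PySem

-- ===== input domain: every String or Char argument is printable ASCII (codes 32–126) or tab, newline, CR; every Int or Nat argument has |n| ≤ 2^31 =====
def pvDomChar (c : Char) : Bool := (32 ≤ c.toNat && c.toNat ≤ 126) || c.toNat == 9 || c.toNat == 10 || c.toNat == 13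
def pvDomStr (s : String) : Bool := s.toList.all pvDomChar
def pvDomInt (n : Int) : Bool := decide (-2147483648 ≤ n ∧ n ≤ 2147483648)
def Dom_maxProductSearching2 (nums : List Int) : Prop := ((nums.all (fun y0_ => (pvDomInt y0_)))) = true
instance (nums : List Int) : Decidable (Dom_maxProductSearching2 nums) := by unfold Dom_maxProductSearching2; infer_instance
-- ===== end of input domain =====

-- B replaces A's hand-rolled two-maxima tracking loop by sorting the input padded with two extra
-- zeros in descending order and taking its first two elements; objective: simpler.

-- ===== PORT A =====
def maxProductSearching2 (nums : List Int) : Int :=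
  if nums.length < 1 then -1
  else if nums.length = 2 then
    (PySem.List.pyGetD nums 0 0 - 1) * (PySem.List.pyGetD nums 1 0 - 1)
  else
    -- max1 = max2 = 0; for num in nums: …
    let p := nums.foldl (fun (s : Int × Int) num =>
      if num > s.1 then (num, s.1)
      else if num > s.2 then (s.1, num)
      else s) (0, 0)
    (p.1 - 1) * (p.2 - 1)

-- ===== PORT B =====
def maxProductSearching2_alt (nums : List Int) : Int :=
  if nums.length < 1 then -1
  else if nums.length = 2 then
    (PySem.List.pyGetD nums 0 0 - 1) * (PySem.List.pyGetD nums 1 0 - 1)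
  else
    -- s = sorted(nums + [0, 0], reverse=True)
    let s := PySem.List.sorted (nums ++ [0, 0]) (fun x => x) true
    (PySem.List.pyGetD s 0 0 - 1) * (PySem.List.pyGetD s 1 0 - 1)

-- ===== PRECONDITION & SPEC =====
def Spec_maxProductSearching2 (nums : List Int) (out : Int) : Prop := out = maxProductSearching2_alt nums
instance (nums : List Int) (out : Int) : Decidable (Spec_maxProductSearching2 nums out) := by unfold Spec_maxProductSearching2; infer_instance

-- ===== CLAIM (what is proved, stated in full; the proofs are below) =====
def Claim_equal_maxProductSearching2 : Prop := ∀ (nums : List Int), Dom_maxProductSearching2 nums → Spec_maxProductSearching2 nums (maxProductSearching2 nums)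

-- ===== LEMMAS AND PROOFS =====

-- A's loop step
def pvStepA (s : Int × Int) (num : Int) : Int × Int :=
  if num > s.1 then (num, s.1)
  else if num > s.2 then (s.1, num)
  else s

-- an order-insensitive (right-commutative) reformulation of the same step
def pvStepG (s : Int × Int) (x : Int) : Int × Int := (max s.1 x, max (min s.1 x) s.2)

lemma pvStepG_rightComm (s : Int × Int) (x y : Int) :
    pvStepG (pvStepG s x) y = pvStepG (pvStepG s y) x := by
  simp only [pvStepG, Prod.mk.injEq]
  omega

-- on states with snd ≤ fst (A's loop invariant) the two steps agree, fold-wise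
lemma pvFoldA_eq_foldG : ∀ (l : List Int) (a b : Int), b ≤ a →
    l.foldl pvStepA (a, b) = l.foldl pvStepG (a, b) := by
  intro l
  induction l with
  | nil => intro a b _; rfl
  | cons x t ih =>
    intro a b hba
    have hstep : pvStepA (a, b) x = pvStepG (a, b) x := by
      simp only [pvStepA, pvStepG]
      split_ifs <;> simp_all <;> omega
    have hinv : (pvStepG (a, b) x).2 ≤ (pvStepG (a, b) x).1 := by
      simp only [pvStepG]; omega
    calc (x :: t).foldl pvStepA (a, b) = t.foldl pvStepA (pvStepG (a, b) x) := by
            simp [List.foldl, hstep]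
      _ = t.foldl pvStepG (pvStepG (a, b) x) := ih _ _ hinv
      _ = (x :: t).foldl pvStepG (a, b) := by simp [List.foldl]

-- the G-fold keeps 0 ≤ snd ≤ fst
lemma pvFoldG_bounds : ∀ (l : List Int) (a b : Int), 0 ≤ b → b ≤ a →
    0 ≤ (l.foldl pvStepG (a, b)).2 ∧ (l.foldl pvStepG (a, b)).2 ≤ (l.foldl pvStepG (a, b)).1 := by
  intro l
  induction l with
  | nil => intro a b h0 hba; exact ⟨h0, hba⟩
  | cons x t ih =>
    intro a b h0 hba
    have := ih (max a x) (max (min a x) b) (by omega) (by omega)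
    simpa [List.foldl, pvStepG] using this

-- elements ≤ snd of the state leave the G-fold state unchanged
lemma pvFoldG_const : ∀ (l : List Int) (a b : Int), b ≤ a → (∀ r ∈ l, r ≤ b) →
    l.foldl pvStepG (a, b) = (a, b) := by
  intro l
  induction l with
  | nil => intro a b _ _; rfl
  | cons x t ih =>
    intro a b hba hle
    have hx : x ≤ b := hle x (by simp)
    have hs : pvStepG (a, b) x = (a, b) := by
      simp only [pvStepG, Prod.mk.injEq]; omega
    have := ih a b hba (fun r hr => hle r (by simp [hr]))
    simpa [List.foldl, hs] using this

-- appending the two zeros does not change the G-fold value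
lemma pvFoldG_pad (nums : List Int) :
    (nums ++ [0, 0]).foldl pvStepG (0, 0) = nums.foldl pvStepG (0, 0) := by
  obtain ⟨h0, hba⟩ := pvFoldG_bounds nums 0 0 le_rfl le_rfl
  rw [List.foldl_append]
  exact pvFoldG_const [0, 0] _ _ hba (by intro r hr; simp at hr; omega)

-- folding G over any permutation gives the same value
lemma pvFoldG_perm (l l' : List Int) (h : l.Perm l') (init : Int × Int) :
    l.foldl pvStepG init = l'.foldl pvStepG init :=
  @List.Perm.foldl_eq _ _ pvStepG _ _ ⟨pvStepG_rightComm⟩ h init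

-- the G-fold over a descending list with second element ≥ 0 is its first two elements
lemma pvFoldG_sorted_desc (x0 x1 : Int) (rest : List Int)
    (hp : (x0 :: x1 :: rest).Pairwise (fun a b => b ≤ a)) (h1 : 0 ≤ x1) :
    (x0 :: x1 :: rest).foldl pvStepG (0, 0) = (x0, x1) := by
  rw [List.pairwise_cons] at hp
  obtain ⟨hx0, hp⟩ := hp
  rw [List.pairwise_cons] at hp
  obtain ⟨hx1, _⟩ := hp
  have h01 : x1 ≤ x0 := hx0 x1 (by simp)
  have e0 : pvStepG (0, 0) x0 = (x0, 0) := by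
    simp only [pvStepG, Prod.mk.injEq]; omega
  have e1 : pvStepG (x0, 0) x1 = (x0, x1) := by
    simp only [pvStepG, Prod.mk.injEq]; omega
  calc (x0 :: x1 :: rest).foldl pvStepG (0, 0)
      = rest.foldl pvStepG (x0, x1) := by simp [List.foldl, e0, e1]
    _ = (x0, x1) := pvFoldG_const rest x0 x1 h01 hx1

-- the key fact: A's loop value = the first two elements of B's descending sort
lemma pvLoop_eq_sorted (nums : List Int) :
    nums.foldl pvStepA (0, 0) =
      (PySem.List.pyGetD (PySem.List.sorted (nums ++ [0, 0]) (fun x => x) true) 0 0,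
       PySem.List.pyGetD (PySem.List.sorted (nums ++ [0, 0]) (fun x => x) true) 1 0) := by
  set s := PySem.List.sorted (nums ++ [0, 0]) (fun x => x) true with hs
  have hperm : s.Perm (nums ++ [0, 0]) := PySem.List.sorted_perm _ _ _
  have hlen : 2 ≤ s.length := by
    have := hperm.length_eq
    simp [List.length_append] at this
    omega
  obtain ⟨x0, x1, rest, hsform⟩ : ∃ x0 x1 rest, s = x0 :: x1 :: rest := by
    match s, hlen with
    | x0 :: x1 :: rest, _ => exact ⟨x0, x1, rest, rfl⟩
  have hpair : s.Pairwise (fun a b => b ≤ a) := PySem.List.sorted_pairwise_rev _ _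
  -- the second element of the sort is ≥ 0: the input contains two zeros
  have hcount : 2 ≤ s.count 0 := by
    have := hperm.count_eq 0
    simp [List.count_append] at this
    omega
  have h1 : 0 ≤ x1 := by
    by_contra hneg
    have hneg : x1 < 0 := lt_of_not_ge hneg
    rw [hsform, List.pairwise_cons] at hpair
    obtain ⟨_, hpair⟩ := hpair
    rw [List.pairwise_cons] at hpair
    obtain ⟨hx1, _⟩ := hpair
    have hnot : (0 : Int) ∉ x1 :: rest := by
      intro hmem
      rcases List.mem_cons.mp hmem with h | h
      · omega
      · have := hx1 0 h; omega
    have : s.count 0 ≤ 1 := by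
      rw [hsform]
      have : List.count 0 (x1 :: rest) = 0 := List.count_eq_zero.mpr hnot
      simp [List.count_cons, this]
      split_ifs <;> omega
    omega
  rw [hsform] at hpair
  calc nums.foldl pvStepA (0, 0)
      = nums.foldl pvStepG (0, 0) := pvFoldA_eq_foldG nums 0 0 le_rfl
    _ = (nums ++ [0, 0]).foldl pvStepG (0, 0) := (pvFoldG_pad nums).symm
    _ = s.foldl pvStepG (0, 0) := pvFoldG_perm _ _ hperm.symm _
    _ = (x0, x1) := by rw [hsform]; exact pvFoldG_sorted_desc x0 x1 rest hpair h1
    _ = _ := by rw [hsform]; simp [pysem]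

-- ===== VERDICT (by name: the statement is the Claim_ definition above) =====
theorem maxProductSearching2_spec : Claim_equal_maxProductSearching2 := by
  intro nums _
  unfold Spec_maxProductSearching2 maxProductSearching2 maxProductSearching2_alt
  by_cases h1 : nums.length < 1
  · simp [h1]
  · by_cases h2 : nums.length = 2
    · simp [h2]
    · simp only [h1, h2, if_false]
      have := pvLoop_eq_sorted nums
      rw [show (fun (s : Int × Int) num =>
        if num > s.1 then (num, s.1)
        else if num > s.2 then (s.1, num)
        else s) = pvStepA from rfl, this]
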